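-- pv_equiv track=rewrite | github.com/Mouret-Orfeu/Projet-Code-circulaire | src/main_ter.py | count_valid_combinations_bis
-- ===== SOURCE A (Python) =====
-- import itertools
-- import math
--
-- def count_valid_combinations_bis(L, autocomplements, n):
--     L_list_of_lens = [len(l) for l in L]
--     autocomplements_list_of_lens = [len(l) for l in autocomplements]
--     len_L = len(L)
--     len_autocomplements = len(autocomplements)
--     m = max(0, (n-len_autocomplements+1)//2)
--     M = min(n//2+1, len_L)
--     return sum(
--         math.prod(L_subset)*math.prod(autocomplements_subset)
--         for i in range(m, M) for L_subset in itertools.combinations(L_list_of_lens, i)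
--         for autocomplements_subset in itertools.combinations(autocomplements_list_of_lens, n-2*i))
-- ===== SOURCE B (Python) =====
-- def count_valid_combinations_bis(L, autocomplements, n):
--     m = max(0, (n - len(autocomplements) + 1) // 2)
--     M = min(n // 2 + 1, len(L))
--     if M <= m:
--         return 0
--     def esym(xs, d):
--         # e_0..e_d: elementary symmetric polynomials of xs, DP truncated at degree d
--         e = [1] + [0] * d
--         for x in xs:
--             e = [a + x * b for a, b in zip(e, [0] + e)]
--         return e
--     eL = esym([len(l) for l in L], M - 1)
--     eA = esym([len(l) for l in autocomplements], n - 2 * m)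
--     return sum(eL[i] * eA[n - 2 * i] for i in range(m, M))
-- ===== Notes on version B (the rewrite author's own statement) =====
-- stated objective: alternative
-- what changed: Instead of enumerating every subset pair via itertools.combinations, B computes the elementary symmetric polynomials of the two length lists with a truncated quadratic DP and sums e_i(L)*e_{n-2i}(autocomplements) over the same index range.
import Mathlib
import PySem

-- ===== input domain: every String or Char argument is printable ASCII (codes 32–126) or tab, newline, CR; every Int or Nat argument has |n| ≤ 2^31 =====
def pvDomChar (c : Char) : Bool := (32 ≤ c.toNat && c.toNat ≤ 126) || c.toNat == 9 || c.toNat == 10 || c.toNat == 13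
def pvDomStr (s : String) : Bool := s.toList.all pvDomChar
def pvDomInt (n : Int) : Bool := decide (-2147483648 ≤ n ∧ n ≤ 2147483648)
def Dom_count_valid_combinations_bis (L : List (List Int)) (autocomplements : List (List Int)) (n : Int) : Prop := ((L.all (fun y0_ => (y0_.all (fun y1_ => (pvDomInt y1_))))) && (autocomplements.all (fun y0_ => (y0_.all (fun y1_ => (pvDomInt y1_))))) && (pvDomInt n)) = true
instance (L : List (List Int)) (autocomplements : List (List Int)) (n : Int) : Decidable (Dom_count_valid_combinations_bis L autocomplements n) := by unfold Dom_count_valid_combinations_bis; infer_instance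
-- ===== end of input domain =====

-- B replaces A's enumeration of subset pairs by a DP computing the elementary symmetric
-- polynomials of the two length lists, then sums e_i(L)·e_{n-2i}(A) over the same index
-- range (objective: alternative algorithm).

-- ===== PORT A =====
def count_valid_combinations_bis (L : List (List Int)) (autocomplements : List (List Int)) (n : Int) : Int :=
  let L_list_of_lens := L.map (fun l => (l.length : Int))
  let autocomplements_list_of_lens := autocomplements.map (fun l => (l.length : Int))
  let len_L : Int := L.length
  let len_autocomplements : Int := autocomplements.length
  let m := max 0 (PySem.Int.floordiv (n - len_autocomplements + 1) 2)
  let M := min (PySem.Int.floordiv n 2 + 1) len_L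
  ((PySem.List.pyRange m M 1).map (fun i =>
    ((PySem.List.combinations L_list_of_lens i.toNat).map (fun L_subset =>
      ((PySem.List.combinations autocomplements_list_of_lens (n - 2 * i).toNat).map
        (fun autocomplements_subset => L_subset.prod * autocomplements_subset.prod)).sum)).sum)).sum

-- ===== PORT B =====
-- e_0..e_d: elementary symmetric polynomials of xs, DP truncated at degree d (Source B's esym)
def pvEsym (xs : List Int) (d : Nat) : List Int :=
  xs.foldl (fun e x => List.zipWith (fun a b => a + x * b) e (0 :: e)) (1 :: List.replicate d 0)

def count_valid_combinations_bis_alt (L : List (List Int)) (autocomplements : List (List Int)) (n : Int) : Int :=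
  let m := max 0 (PySem.Int.floordiv (n - (autocomplements.length : Int) + 1) 2)
  let M := min (PySem.Int.floordiv n 2 + 1) (L.length : Int)
  if M ≤ m then 0
  else
    let eL := pvEsym (L.map (fun l => (l.length : Int))) (M - 1).toNat
    let eA := pvEsym (autocomplements.map (fun l => (l.length : Int))) (n - 2 * m).toNat
    ((PySem.List.pyRange m M 1).map (fun i =>
      PySem.List.pyGetD eL i 0 * PySem.List.pyGetD eA (n - 2 * i) 0)).sum

-- ===== PRECONDITION & SPEC =====
def Spec_count_valid_combinations_bis (L : List (List Int)) (autocomplements : List (List Int)) (n : Int) (out : Int) : Prop := out = count_valid_combinations_bis_alt L autocomplements n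
instance (L : List (List Int)) (autocomplements : List (List Int)) (n : Int) (out : Int) : Decidable (Spec_count_valid_combinations_bis L autocomplements n out) := by unfold Spec_count_valid_combinations_bis; infer_instance

-- ===== CLAIM (what is proved, stated in full; the proofs are below) =====
def Claim_equal_count_valid_combinations_bis : Prop := ∀ (L : List (List Int)) (autocomplements : List (List Int)) (n : Int), Dom_count_valid_combinations_bis L autocomplements n → Spec_count_valid_combinations_bis L autocomplements n (count_valid_combinations_bis L autocomplements n)

-- ===== LEMMAS AND PROOFS =====

-- the k-th elementary symmetric polynomial, mathematical recursion
def esymK : Nat → List Int → Int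
  | 0, _ => 1
  | _ + 1, [] => 0
  | k + 1, x :: xs => esymK (k + 1) xs + x * esymK k xs

-- A's inner sums: sum of products over itertools.combinations = esymK
theorem sum_prod_combinations (xs : List Int) : ∀ k, ((PySem.List.combinations xs k).map List.prod).sum = esymK k xs := by
  induction xs with
  | nil => intro k; cases k <;> simp [PySem.List.combinations_zero, PySem.List.combinations_nil_succ, esymK]
  | cons x xs ih =>
    intro k
    cases k with
    | zero => simp [PySem.List.combinations_zero, esymK]
    | succ k =>
      rw [PySem.List.combinations_cons_succ]
      simp only [List.map_append, List.map_map, List.sum_append, esymK]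
      rw [← ih (k + 1)]
      have : (List.map (List.prod ∘ (x :: ·)) (PySem.List.combinations xs k)).sum
          = x * ((PySem.List.combinations xs k).map List.prod).sum := by
        rw [← List.sum_map_mul_left]
        exact congrArg List.sum (List.map_congr_left (fun t _ => by simp))
      rw [this, ih k]; ring

theorem esymK_append_singleton (x : Int) : ∀ (l : List Int) (k : Nat),
    esymK (k + 1) (l ++ [x]) = esymK (k + 1) l + x * esymK k l := by
  intro l
  induction l with
  | nil => intro k; cases k <;> simp only [List.nil_append, esymK]
  | cons a l ih =>
    intro k
    cases k with
    | zero => simp [esymK, ih 0]; ring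
    | succ k =>
      simp only [List.cons_append, esymK, ih (k + 1), ih k]
      ring

theorem zipWith_map_same {α β γ δ : Type} (f : β → γ → δ) (g : α → β) (h : α → γ) (l : List α) :
    List.zipWith f (l.map g) (l.map h) = l.map (fun a => f (g a) (h a)) := by
  induction l with
  | nil => rfl
  | cons a l ih => simp [ih]

theorem zipWith_append_right_of_le {α β γ : Type} (f : α → β → γ) :
    ∀ (l₁ : List α) (l₂ l₃ : List β), l₁.length ≤ l₂.length →
      List.zipWith f l₁ (l₂ ++ l₃) = List.zipWith f l₁ l₂ := by
  intro l₁
  induction l₁ with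
  | nil => intro l₂ l₃ _; rfl
  | cons a l₁ ih =>
    intro l₂ l₃ h
    cases l₂ with
    | nil => simp at h
    | cons b l₂ => simp [ih l₂ l₃ (by simpa using h)]

-- B's DP invariant: pvEsym xs d lists esymK 0..d of xs
theorem pvEsym_eq (xs : List Int) (d : Nat) :
    pvEsym xs d = (List.range (d + 1)).map (fun k => esymK k xs) := by
  induction xs using List.reverseRecOn with
  | nil =>
    show (1 : Int) :: List.replicate d 0 = _
    rw [List.range_succ_eq_map, List.map_cons, List.map_map]
    refine congrArg (_ :: ·) ?_
    rw [show ((fun k => esymK k ([] : List Int)) ∘ Nat.succ) = (fun _ => (0 : Int)) from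
      funext (fun k => by simp [esymK]), List.map_const']
    simp
  | append_singleton ys x ih =>
    rw [pvEsym, List.foldl_append, ← pvEsym, ih]
    simp only [List.foldl_cons, List.foldl_nil]
    have h2 : (0 : Int) :: (List.range (d + 1)).map (fun k => esymK k ys)
        = ((0 : Int) :: (List.range d).map (fun k => esymK k ys))
            ++ [(fun k => esymK k ys) d] := by
      rw [List.range_succ, List.map_append]; rfl
    rw [h2, zipWith_append_right_of_le _ _ _ _ (by simp),
        show (0 : Int) :: (List.range d).map (fun k => esymK k ys)
          = (List.range (d + 1)).map (fun k => match k with | 0 => (0 : Int) | k + 1 => esymK k ys) by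
            rw [List.range_succ_eq_map, List.map_cons, List.map_map]
            exact congrArg (_ :: ·) (List.map_congr_left (fun k _ => rfl)).symm,
        zipWith_map_same]
    refine List.map_congr_left ?_
    intro k hk
    cases k with
    | zero => simp [esymK]
    | succ k => simpa using (esymK_append_singleton x ys k).symm

-- ===== VERDICT (by name: the statement is the Claim_ definition above) =====
theorem count_valid_combinations_bis_spec : Claim_equal_count_valid_combinations_bis := by
  intro L autocomplements n _
  unfold Spec_count_valid_combinations_bis count_valid_combinations_bis count_valid_combinations_bis_alt
  simp only
  split_ifs with hMm
  · rw [PySem.List.pyRange_one_eq_nil hMm]; rfl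
  · refine congrArg List.sum (List.map_congr_left ?_)
    intro i hi
    rw [PySem.List.mem_pyRange_one] at hi
    obtain ⟨him, hiM⟩ := hi
    have hdiv2 : PySem.Int.floordiv n 2 = n / 2 := PySem.Int.floordiv_eq_ediv_of_pos (by omega)
    have hdivA : PySem.Int.floordiv (n - (autocomplements.length : Int) + 1) 2
        = (n - (autocomplements.length : Int) + 1) / 2 := PySem.Int.floordiv_eq_ediv_of_pos (by omega)
    rw [hdiv2] at hiM
    rw [hdivA] at him
    rw [hdiv2, hdivA] at hMm
    have h0i : 0 ≤ i := le_trans (le_max_left _ _) him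
    have hiL : i < (L.length : Int) := lt_of_lt_of_le hiM (min_le_right _ _)
    have hiM2 : i ≤ n / 2 := by
      have := lt_of_lt_of_le hiM (min_le_left _ _); omega
    have hin2 : 0 ≤ n - 2 * i := by omega
    have hm0 : (0 : Int) ≤ max 0 ((n - (autocomplements.length : Int) + 1) / 2) := le_max_left _ _
    have hmi : max 0 ((n - (autocomplements.length : Int) + 1) / 2) ≤ i := him
    have hmM : max 0 ((n - (autocomplements.length : Int) + 1) / 2)
        < min (n / 2 + 1) (L.length : Int) := by omega
    -- A side: both subset sums are elementary symmetric polynomials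
    have hA : ((PySem.List.combinations (autocomplements.map (fun l => (l.length : Int))) (n - 2 * i).toNat).map
        (fun t => List.prod t)).sum = esymK (n - 2 * i).toNat (autocomplements.map (fun l => (l.length : Int))) :=
      sum_prod_combinations _ _
    have hinner : ∀ s : List Int,
        ((PySem.List.combinations (autocomplements.map (fun l => (l.length : Int))) (n - 2 * i).toNat).map
          (fun t => s.prod * t.prod)).sum
        = s.prod * esymK (n - 2 * i).toNat (autocomplements.map (fun l => (l.length : Int))) := by
      intro s
      rw [← hA, ← List.sum_map_mul_left]
    rw [List.map_congr_left (fun s _ => hinner s), List.sum_map_mul_right, sum_prod_combinations]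
    -- B side: the DP tables hold the same values at the indexed positions
    rw [pvEsym_eq, pvEsym_eq]
    rw [PySem.List.pyGetD_eq_getElem _ _ h0i (by simp; omega),
        PySem.List.pyGetD_eq_getElem _ _ hin2 (by simp; omega)]
    simp
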